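-- pv_equiv track=rewrite | github.com/kuznetsovvj/education | algorithms/codeforces/1851c.py | check
-- ===== SOURCE A (Python) =====
-- def check(n, k, seq):
--     s, i, cnt = seq[0], 1, 1
--     while cnt < k and i != n:
--         if seq[i] == s:
--             cnt += 1
--         i += 1
--     if cnt < k:
--         return "NO"
--     f = seq[-1]
--     if s == f:
--         return "YES"
--     cnt = 0
--     while cnt < k and i != n:
--         if seq[i] == f:
--             cnt += 1
--         i += 1
--     if cnt < k:
--         return "NO"
--     return "YES"
-- ===== SOURCE B (Python) =====
-- def kth_index(xs, t, k):
--     need = k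
--     for i, x in enumerate(xs):
--         if x == t:
--             need -= 1
--             if need == 0:
--                 return i
--     return None
--
--
-- def check(n, k, seq):
--     if k <= 0:
--         return "YES"
--     s, f = seq[0], seq[-1]
--     pre = seq[:n]
--     a = kth_index(pre, s, k)
--     if a is None:
--         return "NO"
--     if s == f:
--         return "YES"
--     r = kth_index(pre[::-1], f, k)
--     if r is None:
--         return "NO"
--     b = len(pre) - 1 - r
--     return "YES" if a < b else "NO"
-- ===== Notes on version B (the rewrite author's own statement) =====
-- stated objective: alternative
-- what changed: A's single continuation pass (the second count resumes at the index where the first loop stopped) is replaced by two independent directional scans: find the k-th occurrence of seq[0] scanning seq[:n] left-to-right and the k-th occurrence of seq[-1] scanning it right-to-left, then answer YES iff both exist and the first index is strictly left of the second.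
-- outside the precondition, e.g. on check(0, 2, [5, 5, 5]): A returns 'YES', B returns 'NO'; on check(0, 1, [7]): A returns 'YES', B returns 'NO'; on check(5, 3, [2, 2]): A raises IndexError, B returns 'NO'
import Mathlib
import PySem

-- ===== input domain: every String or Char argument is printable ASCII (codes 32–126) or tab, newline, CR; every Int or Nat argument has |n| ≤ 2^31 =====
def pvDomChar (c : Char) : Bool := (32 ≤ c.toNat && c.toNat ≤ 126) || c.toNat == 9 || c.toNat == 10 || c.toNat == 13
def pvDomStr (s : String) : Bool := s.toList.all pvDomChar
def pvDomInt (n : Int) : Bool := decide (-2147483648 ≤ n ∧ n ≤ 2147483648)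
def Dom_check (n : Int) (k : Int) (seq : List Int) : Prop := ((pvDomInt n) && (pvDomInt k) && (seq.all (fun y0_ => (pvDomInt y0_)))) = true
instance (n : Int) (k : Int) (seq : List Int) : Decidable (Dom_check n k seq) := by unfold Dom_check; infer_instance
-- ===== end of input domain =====

-- B replaces A's single continuation pass (second count resumes where the first loop stopped) by two
-- INDEPENDENT directional scans on seq[:n] — k-th occurrence of seq[0] from the left, k-th occurrence
-- of seq[-1] from the right — answering by comparing the two indices (objective: alternative; not faster).

-- ===== PORT A =====
-- A's while-loop (shared by both passes): scans seq[i] while cnt < k and i != n.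
-- Fuel bounds the iterations; under Pre_check the fuel seq.length is never exhausted.
def checkScan (seq : List Int) (n k t : Int) : Nat → Int → Int → Int × Int
  | 0, i, cnt => (i, cnt)
  | fuel + 1, i, cnt =>
    if cnt < k ∧ i ≠ n then
      match PySem.List.pyGet? seq i with
      | some v => checkScan seq n k t fuel (i + 1) (if v = t then cnt + 1 else cnt)
      | none => (i, cnt)   -- Python raises IndexError here; excluded by Pre_check
    else (i, cnt)

def check (n : Int) (k : Int) (seq : List Int) : String :=
  match PySem.List.pyGet? seq 0 with
  | none => "NO"   -- seq[0] raises IndexError on []; excluded by Pre_check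
  | some s =>
    let r1 := checkScan seq n k s seq.length 1 1
    if r1.2 < k then "NO"
    else
      match PySem.List.pyGet? seq (-1) with
      | none => "NO"   -- unreachable: seq nonempty whenever s was obtained
      | some f =>
        if s = f then "YES"
        else
          let r2 := checkScan seq n k f seq.length r1.1 0
          if r2.2 < k then "NO" else "YES"

-- ===== PORT B =====
-- kth_index(xs, t, k): enumerate xs, decrement need at each occurrence of t, return the index at 0.
def kthIndexAux (t : Int) : List Int → Int → Nat → Option Nat
  | [], _, _ => none
  | x :: xs, need, i =>
    if x = t then
      if need - 1 = 0 then some i else kthIndexAux t xs (need - 1) (i + 1)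
    else kthIndexAux t xs need (i + 1)

def kthIndex (xs : List Int) (t k : Int) : Option Nat := kthIndexAux t xs k 0

def check_alt (n : Int) (k : Int) (seq : List Int) : String :=
  if k ≤ 0 then "YES"
  else
    match PySem.List.pyGet? seq 0, PySem.List.pyGet? seq (-1) with
    | some s, some f =>
      let pre := PySem.List.slice seq none (some n)
      match kthIndex pre s k with
      | none => "NO"
      | some a =>
        if s = f then "YES"
        else
          -- pre[::-1] ported as pre.reverse (exact: PySem.List.slice?_none_none_neg_one)
          match kthIndex pre.reverse f k with
          | none => "NO"
          | some r =>
            if (a : Int) < (pre.length : Int) - 1 - (r : Int) then "YES" else "NO"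
    | _, _ => "NO"   -- seq[0] raises IndexError on []; excluded by Pre_check

-- ===== PRECONDITION & SPEC =====
-- Pre_check keeps the natural domain (nonempty seq, 1 <= n <= len(seq)) plus the out-of-range-n
-- inputs where A provably still returns and the prefix reading agrees (k <= 0; k = 1 or a repeated
-- endpoint with enough copies, with n >= 1).  It excludes seq = [] (seq[0] raises at once) and the
-- remaining n outside [1, len]: there A's loop conditions 'i != n' scan past the requested prefix
-- seq[:n] and usually raise IndexError; on the exceptional such inputs where A still returns, its
-- value reflects elements outside seq[:n] and B's prefix-based value is equally defensible.
def Pre_check (n : Int) (k : Int) (seq : List Int) : Prop :=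
  seq ≠ [] ∧ (k ≤ 0 ∨ (1 ≤ n ∧ n ≤ (seq.length : Int)) ∨ (k = 1 ∧ 1 ≤ n) ∨
    (1 ≤ n ∧ seq.head? = seq.getLast? ∧ k ≤ ((List.count (seq.headD 0) seq : Nat) : Int)))
instance (n : Int) (k : Int) (seq : List Int) : Decidable (Pre_check n k seq) := by
  unfold Pre_check; infer_instance

def pvWitness_check : Int × Int × List Int := (3, 2, [1, 5, 1])

def Spec_check (n : Int) (k : Int) (seq : List Int) (out : String) : Prop := out = check_alt n k seq
instance (n : Int) (k : Int) (seq : List Int) (out : String) : Decidable (Spec_check n k seq out) := by unfold Spec_check; infer_instance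

-- ===== CLAIM (what is proved, stated in full; the proofs are below) =====
def Claim_equal_check : Prop := ∀ (n : Int) (k : Int) (seq : List Int), Dom_check n k seq → Pre_check n k seq → Spec_check n k seq (check n k seq)

-- ===== LEMMAS AND PROOFS =====

-- indices of the occurrences of t in a list
def occIdx (t : Int) : List Int → List Nat
  | [] => []
  | x :: xs => if x = t then 0 :: (occIdx t xs).map (· + 1) else (occIdx t xs).map (· + 1)

-- A's loop, freed from fuel and bounds: structural recursion on the untraversed segment
def scanSeg (k t : Int) : List Int → Int → Int → Int × Int
  | [], i, cnt => (i, cnt)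
  | x :: xs, i, cnt =>
    if cnt < k then scanSeg k t xs (i + 1) (if x = t then cnt + 1 else cnt) else (i, cnt)

theorem scanSeg_of_ge (k t : Int) (xs : List Int) (i cnt : Int) (h : ¬ cnt < k) :
    scanSeg k t xs i cnt = (i, cnt) := by
  cases xs <;> simp [scanSeg, h]

theorem length_occIdx (t : Int) (xs : List Int) : (occIdx t xs).length = xs.count t := by
  induction xs with
  | nil => simp [occIdx]
  | cons x xs ih =>
    by_cases hx : x = t <;> simp [occIdx, hx, ih, List.count_cons]

theorem mem_occIdx_lt (t : Int) (xs : List Int) (p : Nat) (hp : p ∈ occIdx t xs) :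
    p < xs.length := by
  induction xs generalizing p with
  | nil => simp [occIdx] at hp
  | cons x xs ih =>
    rw [occIdx] at hp
    split_ifs at hp with hx
    · rcases List.mem_cons.mp hp with rfl | hmem
      · simp
      · obtain ⟨q, hq, rfl⟩ := List.mem_map.mp hmem
        have := ih q hq
        simp only [List.length_cons]
        omega
    · obtain ⟨q, hq, rfl⟩ := List.mem_map.mp hp
      have := ih q hq
      simp only [List.length_cons]
      omega

theorem scanSeg_bridge (k t : Int) (xs : List Int) (i cnt : Int) (h : cnt < k) :
    scanSeg k t xs i cnt =
      match (occIdx t xs)[(k - cnt - 1).toNat]? with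
      | some p => (i + (p : Int) + 1, k)
      | none => (i + (xs.length : Int), cnt + (xs.count t : Int)) := by
  induction xs generalizing i cnt with
  | nil => simp [scanSeg, occIdx]
  | cons x xs ih =>
    by_cases hx : x = t
    · by_cases h2 : cnt + 1 < k
      · have hidx : (k - cnt - 1).toNat = (k - (cnt + 1) - 1).toNat + 1 := by omega
        rw [scanSeg, if_pos h, if_pos hx, ih _ _ h2]
        simp only [occIdx, if_pos hx, hidx, List.getElem?_cons_succ, List.getElem?_map]
        cases hq : (occIdx t xs)[(k - (cnt + 1) - 1).toNat]? with
        | some p => simp; omega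
        | none => simp [List.count_cons, hx]; constructor <;> omega
      · have hk : cnt + 1 = k := by omega
        have hidx : (k - cnt - 1).toNat = 0 := by omega
        rw [scanSeg, if_pos h, if_pos hx, scanSeg_of_ge _ _ _ _ _ (by omega)]
        simp [occIdx, hx, hidx, hk]
    · rw [scanSeg, if_pos h, if_neg hx, ih _ _ h]
      simp only [occIdx, if_neg hx, List.getElem?_map]
      cases hq : (occIdx t xs)[(k - cnt - 1).toNat]? with
      | some p => simp; omega
      | none => simp [List.count_cons, hx]; omega

theorem scanSeg_bridge_some (k t : Int) (xs : List Int) (i cnt : Int) (p : Nat)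
    (h : cnt < k) (hp : (occIdx t xs)[(k - cnt - 1).toNat]? = some p) :
    scanSeg k t xs i cnt = (i + (p : Int) + 1, k) := by
  rw [scanSeg_bridge k t xs i cnt h, hp]

theorem scanSeg_bridge_none (k t : Int) (xs : List Int) (i cnt : Int)
    (h : cnt < k) (hp : (occIdx t xs)[(k - cnt - 1).toNat]? = none) :
    scanSeg k t xs i cnt = (i + (xs.length : Int), cnt + (xs.count t : Int)) := by
  rw [scanSeg_bridge k t xs i cnt h, hp]

theorem scanSeg_snd_lt (k t : Int) (xs : List Int) (i cnt : Int) (h : cnt ≤ k) :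
    ((scanSeg k t xs i cnt).2 < k ↔ cnt + (xs.count t : Int) < k) := by
  induction xs generalizing i cnt with
  | nil => simp [scanSeg]
  | cons x xs ih =>
    by_cases hlt : cnt < k
    · rw [scanSeg, if_pos hlt]
      by_cases hx : x = t
      · rw [if_pos hx, ih _ _ (by omega)]
        simp [hx, List.count_cons]
        omega
      · rw [if_neg hx, ih _ _ h]
        simp [hx, List.count_cons]
    · rw [scanSeg, if_neg hlt]
      have hc : (0 : Int) ≤ (xs.count t : Int) + (if x = t then 1 else 0) := by
        split_ifs <;> positivity
      simp only [List.count_cons]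
      constructor <;> intro hh
      · omega
      · exfalso; split_ifs at hc <;> push_cast at hh <;> omega

theorem checkScan_eq (seq : List Int) (n k t : Int) (hn : n ≤ (seq.length : Int)) :
    ∀ (fuel : Nat) (i cnt : Int), 0 ≤ i → i ≤ n → (n - i).toNat ≤ fuel →
      checkScan seq n k t fuel i cnt =
        scanSeg k t ((seq.drop i.toNat).take (n - i).toNat) i cnt := by
  intro fuel
  induction fuel with
  | zero =>
    intro i cnt h0 hi hf
    have : i = n := by omega
    subst this
    simp [checkScan, scanSeg]
  | succ fuel ih =>
    intro i cnt h0 hi hf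
    by_cases hc : cnt < k ∧ i ≠ n
    · have hin : i < n := by omega
      have hlen : i.toNat < seq.length := by omega
      have hget : PySem.List.pyGet? seq i = some seq[i.toNat] :=
        PySem.List.pyGet?_eq_some_getElem seq (by omega) (by push_cast; omega)
      have hdrop : seq.drop i.toNat = seq[i.toNat] :: seq.drop (i.toNat + 1) :=
        List.drop_eq_getElem_cons hlen
      have htn : (n - i).toNat = (n - (i + 1)).toNat + 1 := by omega
      have hi1 : (i + 1).toNat = i.toNat + 1 := by omega
      rw [checkScan, if_pos hc, hget]
      dsimp only
      rw [ih (i + 1) _ (by omega) (by omega) (by omega)]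
      rw [hdrop, htn, List.take_succ_cons, scanSeg, if_pos hc.1, hi1]
    · rw [checkScan, if_neg hc]
      rcases (not_and_or.mp hc) with h1 | h2
      · rw [scanSeg_of_ge _ _ _ _ _ h1]
      · have : i = n := by omega
        subst this
        simp [scanSeg]

theorem checkScan_of_ge (seq : List Int) (n k t : Int) (fuel : Nat) (i cnt : Int)
    (h : ¬ cnt < k) : checkScan seq n k t fuel i cnt = (i, cnt) := by
  cases fuel <;> simp [checkScan, h]

-- A's loop with n beyond the list: it stops by reaching the count k, provided
-- enough occurrences of t remain in the unscanned part.
theorem checkScan_count (seq : List Int) (n k t : Int) (hn : (seq.length : Int) < n) :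
    ∀ (fuel : Nat) (i cnt : Int), 0 ≤ i → cnt ≤ k →
      k - cnt ≤ ((List.count t (seq.drop i.toNat) : Nat) : Int) →
      seq.length - i.toNat ≤ fuel →
      (checkScan seq n k t fuel i cnt).2 = k := by
  intro fuel
  induction fuel with
  | zero =>
    intro i cnt h0 hle hcnt hf
    by_cases hlt : cnt < k
    · exfalso
      have hne : seq.drop i.toNat ≠ [] := by
        intro h
        rw [h] at hcnt
        simp at hcnt
        omega
      have hlen : i.toNat < seq.length := by
        by_contra h
        exact hne (List.drop_eq_nil_of_le (by omega))
      omega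
    · have hk : cnt = k := by omega
      simp [checkScan, hk]
  | succ fuel ih =>
    intro i cnt h0 hle hcnt hf
    by_cases hlt : cnt < k
    · have hiL : i.toNat < seq.length := by
        by_contra h
        rw [List.drop_eq_nil_of_le (by omega)] at hcnt
        simp at hcnt
        omega
      have hcond : cnt < k ∧ i ≠ n := ⟨hlt, by omega⟩
      rw [checkScan, if_pos hcond, PySem.List.pyGet?_eq_some_getElem seq h0 (by push_cast; omega)]
      dsimp only
      have hdrop : seq.drop i.toNat = seq[i.toNat] :: seq.drop (i.toNat + 1) :=
        List.drop_eq_getElem_cons hiL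
      have hi1 : (i + 1).toNat = i.toNat + 1 := by omega
      by_cases hv : seq[i.toNat] = t
      · rw [if_pos hv]
        refine ih (i + 1) (cnt + 1) (by omega) (by omega) ?_ (by omega)
        have hx : (List.count t (seq.drop i.toNat) : Int)
            = (List.count t (seq.drop (i.toNat + 1)) : Int) + 1 := by
          rw [hdrop, List.count_cons]
          simp [hv]
        rw [hi1]
        omega
      · rw [if_neg hv]
        refine ih (i + 1) cnt (by omega) hle ?_ (by omega)
        have hx : List.count t (seq.drop i.toNat)
            = List.count t (seq.drop (i.toNat + 1)) := by
          rw [hdrop, List.count_cons]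
          simp [hv]
        rw [hi1]
        omega
    · rw [checkScan_of_ge _ _ _ _ _ _ _ hlt]
      change cnt = k
      omega

-- B's helper equals indexing into the occurrence-index list
theorem kthIndexAux_eq (t : Int) (xs : List Int) :
    ∀ (need : Int) (i : Nat), 1 ≤ need →
      kthIndexAux t xs need i = ((occIdx t xs)[(need - 1).toNat]?).map (· + i) := by
  induction xs with
  | nil => intro need i h; simp [kthIndexAux, occIdx]
  | cons x xs ih =>
    intro need i h
    by_cases hx : x = t
    · by_cases h1 : need - 1 = 0
      · have : (need - 1).toNat = 0 := by omega
        rw [kthIndexAux, if_pos hx, if_pos h1]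
        simp [occIdx, hx, this]
      · have hidx : (need - 1).toNat = (need - 1 - 1).toNat + 1 := by omega
        rw [kthIndexAux, if_pos hx, if_neg h1, ih (need - 1) (i + 1) (by omega)]
        simp only [occIdx, if_pos hx, hidx, List.getElem?_cons_succ, List.getElem?_map]
        cases hq : (occIdx t xs)[(need - 1 - 1).toNat]? with
        | some p => simp; omega
        | none => simp
    · rw [kthIndexAux, if_neg hx, ih need (i + 1) h]
      simp only [occIdx, if_neg hx, List.getElem?_map]
      cases hq : (occIdx t xs)[(need - 1).toNat]? with
      | some p => simp; omega
      | none => simp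

theorem kthIndex_eq (xs : List Int) (t k : Int) (h : 1 ≤ k) :
    kthIndex xs t k = (occIdx t xs)[(k - 1).toNat]? := by
  rw [kthIndex, kthIndexAux_eq t xs k 0 h]
  cases hq : (occIdx t xs)[(k - 1).toNat]? <;> simp

theorem kthIndex_none (xs : List Int) (t k : Int) (h : 1 ≤ k) :
    kthIndex xs t k = none ↔ ((xs.count t : Nat) : Int) < k := by
  rw [kthIndex_eq xs t k h, List.getElem?_eq_none_iff, length_occIdx]
  omega

-- what an entry of occIdx says about the list
theorem occIdx_getElem?_some (t : Int) (xs : List Int) :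
    ∀ (m p : Nat), (occIdx t xs)[m]? = some p →
      p < xs.length ∧ xs[p]? = some t ∧ (xs.take p).count t = m := by
  induction xs with
  | nil => intro m p h; simp [occIdx] at h
  | cons x xs ih =>
    intro m p h
    by_cases hx : x = t
    · rw [occIdx, if_pos hx] at h
      cases m with
      | zero =>
        rw [List.getElem?_cons_zero] at h
        obtain rfl := Option.some.inj h
        exact ⟨by simp, by simp [hx], by simp⟩
      | succ m' =>
        rw [List.getElem?_cons_succ, List.getElem?_map] at h
        cases hq : (occIdx t xs)[m']? with
        | none => rw [hq] at h; simp at h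
        | some q =>
          rw [hq] at h
          simp only [Option.map_some] at h
          obtain rfl := Option.some.inj h
          obtain ⟨h1, h2, h3⟩ := ih m' q hq
          refine ⟨by simpa using Nat.succ_lt_succ h1, by simpa using h2, ?_⟩
          rw [List.take_succ_cons, List.count_cons, h3]
          simp [hx]
    · rw [occIdx, if_neg hx, List.getElem?_map] at h
      cases hq : (occIdx t xs)[m]? with
      | none => rw [hq] at h; simp at h
      | some q =>
        rw [hq] at h
        simp only [Option.map_some] at h
        obtain rfl := Option.some.inj h
        obtain ⟨h1, h2, h3⟩ := ih m q hq
        refine ⟨by simpa using Nat.succ_lt_succ h1, by simpa using h2, ?_⟩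
        rw [List.take_succ_cons, List.count_cons, h3]
        simp [hx]

theorem count_drop_anti (t : Int) (xs : List Int) (j j' : Nat) (h : j ≤ j') :
    (xs.drop j').count t ≤ (xs.drop j).count t := by
  have hd : xs.drop j' = (xs.drop j).drop (j' - j) := by
    rw [List.drop_drop]
    congr 1
    omega
  rw [hd]
  exact (List.drop_sublist _ _).count_le t

-- the k-th-from-the-right occurrence b of t in pre: pre[b] = t and exactly k-1 copies after it
theorem rev_kth (t : Int) (pre : List Int) (m r : Nat)
    (h : (occIdx t pre.reverse)[m]? = some r) :
    r < pre.length ∧ pre[pre.length - 1 - r]? = some t ∧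
      (pre.drop (pre.length - r)).count t = m := by
  obtain ⟨h1, h2, h3⟩ := occIdx_getElem?_some t pre.reverse m r h
  rw [List.length_reverse] at h1
  refine ⟨h1, ?_, ?_⟩
  · rw [← h2, List.getElem?_reverse h1]
  · have htake : pre.reverse.take r = (pre.drop (pre.length - r)).reverse := by
      rw [List.reverse_drop]
      congr 1
      omega
    rw [htake, List.count_reverse] at h3
    exact h3

theorem check_eq_alt (n k : Int) (seq : List Int) (hpre : Pre_check n k seq) :
    check n k seq = check_alt n k seq := by
  obtain ⟨hne, hdisj⟩ := hpre
  obtain ⟨s, rest, rfl⟩ : ∃ s rest, seq = s :: rest := by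
    cases seq with
    | nil => exact absurd rfl hne
    | cons a l => exact ⟨a, l, rfl⟩
  have hs0 : PySem.List.pyGet? (s :: rest) 0 = some s := by
    simp [PySem.List.pyGet?_zero_cons]
  obtain ⟨f, hf⟩ : ∃ f, (s :: rest).getLast? = some f :=
    Option.isSome_iff_exists.mp (by simp)
  have hsm1 : PySem.List.pyGet? (s :: rest) (-1) = some f := by
    rw [PySem.List.pyGet?_neg_one, hf]
  rw [check, check_alt]
  simp only [hs0, hsm1]
  by_cases hk0 : k ≤ 0
  · -- k ≤ 0 : both sides return "YES", for any n
    rw [if_pos hk0, checkScan_of_ge _ _ _ _ _ _ _ (by omega)]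
    rw [if_neg (show ¬ (((1 : Int), (1 : Int)).2 < k) from by
      change ¬ ((1 : Int) < k); omega)]
    by_cases hsf : s = f
    · rw [if_pos hsf]
    · rw [if_neg hsf, checkScan_of_ge _ _ _ _ _ _ _ (by omega)]
      rw [if_neg (show ¬ (((1 : Int), (0 : Int)).2 < k) from by
        change ¬ ((0 : Int) < k); omega)]
  · rw [if_neg hk0]
    have hk1 : 1 ≤ k := by omega
    have hcase : (1 ≤ n ∧ n ≤ ((s :: rest).length : Int)) ∨
        (((s :: rest).length : Int) < n ∧ k = 1) ∨
        (((s :: rest).length : Int) < n ∧ s = f ∧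
          k ≤ ((List.count s (s :: rest) : Nat) : Int)) := by
      rcases hdisj with h | h | h | h
      · exact absurd h hk0
      · exact Or.inl h
      · by_cases hL : n ≤ ((s :: rest).length : Int)
        · exact Or.inl ⟨h.2, hL⟩
        · exact Or.inr (Or.inl ⟨by omega, h.1⟩)
      · by_cases hL : n ≤ ((s :: rest).length : Int)
        · exact Or.inl ⟨h.1, hL⟩
        · have hh : (s :: rest).head? = some s := rfl
          have hd : (s :: rest).headD 0 = s := rfl
          rw [hh, hf] at h
          rw [hd] at h
          exact Or.inr (Or.inr ⟨by omega, Option.some.inj h.2.1, h.2.2⟩)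
    rcases hcase with ⟨hn1, hnl⟩ | ⟨hgt, hkeq⟩ | ⟨hgt, hsf, hcnt⟩
    · -- the natural domain 1 ≤ n ≤ len(seq)
      have hnl' : n ≤ (rest.length : Int) + 1 := by simpa using hnl
      have hncast : n = ((n.toNat : Nat) : Int) := by omega
      set pre := (s :: rest).take n.toNat with hpredef
      have hslice : PySem.List.slice (s :: rest) none (some n) = pre := by
        conv_lhs => rw [hncast]
        rw [PySem.List.slice_to_natCast]
      have hlenpre : pre.length = n.toNat := by
        rw [hpredef]; simp; omega
      have hpre_cons : pre = s :: rest.take (n.toNat - 1) := by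
        rw [hpredef]
        have h : n.toNat = (n.toNat - 1) + 1 := by omega
        conv_lhs => rw [h]
        rw [List.take_succ_cons]
      set tl := rest.take (n.toNat - 1) with htl
      have htl_len : tl.length = n.toNat - 1 := by
        rw [htl]; simp; omega
      have hseg1 : (List.drop (1 : Int).toNat (s :: rest)).take (n - 1).toNat = tl := by
        have h2 : (n - 1).toNat = n.toNat - 1 := by omega
        simp only [Int.toNat_one, List.drop_succ_cons, List.drop_zero, h2, htl]
      have hscan1 : checkScan (s :: rest) n k s (s :: rest).length 1 1 = scanSeg k s tl 1 1 := by
        rw [checkScan_eq _ n k s hnl _ 1 1 (by omega) (by omega) (by simp; omega), hseg1]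
      have hoccIdx_pre : occIdx s pre = 0 :: (occIdx s tl).map (· + 1) := by
        rw [hpre_cons]; simp [occIdx]
      simp only [hslice]
      have hcount_pre : List.count s pre = List.count s tl + 1 := by
        rw [hpre_cons]; simp [List.count_cons]
      by_cases hclt : ((List.count s pre : Nat) : Int) < k
      · -- fewer than k occurrences of s: both "NO"
        have h2k : 2 ≤ k := by
          by_contra h
          have hk : k = 1 := by omega
          rw [hk] at hclt
          omega
        have hnone : (occIdx s tl)[(k - 1 - 1).toNat]? = none := by
          apply List.getElem?_eq_none
          rw [length_occIdx]
          omega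
        rw [hscan1, scanSeg_bridge_none _ _ _ _ _ (by omega) hnone]
        rw [if_pos (show ((1 + (tl.length : Int), 1 + ((List.count s tl : Nat) : Int)).2 < k) from by
          change 1 + ((List.count s tl : Nat) : Int) < k; omega)]
        rw [(kthIndex_none pre s k hk1).mpr hclt]
      · -- at least k occurrences of s
        push_neg at hclt
        -- c = index of the k-th occurrence of s in pre; A resumes at c+1, B compares indices
        have hj : ∃ (c : Nat), scanSeg k s tl 1 1 = ((c : Int) + 1, k) ∧
            (occIdx s pre)[(k - 1).toNat]? = some c ∧ c + 1 ≤ n.toNat := by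
          rcases Int.lt_or_le 1 k with h2 | h1
          · have hlt : (k - 1 - 1).toNat < (occIdx s tl).length := by
              rw [length_occIdx]; omega
            obtain ⟨p, hp⟩ : ∃ p, (occIdx s tl)[(k - 1 - 1).toNat]? = some p :=
              ⟨(occIdx s tl)[(k - 1 - 1).toNat], List.getElem?_eq_getElem hlt⟩
            refine ⟨p + 1, ?_, ?_, ?_⟩
            · rw [scanSeg_bridge_some _ _ _ _ _ _ (by omega) hp]
              simp only [Prod.mk.injEq]
              exact ⟨by push_cast; ring, by trivial⟩
            · rw [hoccIdx_pre]
              have h : (k - 1).toNat = (k - 1 - 1).toNat + 1 := by omega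
              rw [h, List.getElem?_cons_succ, List.getElem?_map, hp]
              rfl
            · have hpmem : p ∈ occIdx s tl := List.mem_of_getElem? hp
              have hlt2 := mem_occIdx_lt s tl p hpmem
              omega
          · have hk : k = 1 := by omega
            refine ⟨0, ?_, ?_, ?_⟩
            · rw [scanSeg_of_ge _ _ _ _ _ (by omega), hk]
              norm_num
            · rw [hoccIdx_pre]
              have h : (k - 1).toNat = 0 := by omega
              rw [h]
              rfl
            · omega
        obtain ⟨c, hA1, hB1, hbound⟩ := hj
        rw [hscan1, hA1]
        rw [if_neg (show ¬ ((((c : Int) + 1, k)).2 < k) from by change ¬ (k < k); omega)]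
        rw [kthIndex_eq pre s k hk1, hB1]
        dsimp only
        by_cases hsf : s = f
        · -- equal endpoints: both "YES"
          rw [if_pos hsf, if_pos hsf]
        · -- different endpoints: A counts f after c; B finds the k-th f from the right
          rw [if_neg hsf, if_neg hsf]
          have e1 : ((c : Int) + 1).toNat = c + 1 := by omega
          have e2 : (n - ((c : Int) + 1)).toNat = n.toNat - (c + 1) := by omega
          have hseg2 : (List.drop ((c : Int) + 1).toNat (s :: rest)).take
              (n - ((c : Int) + 1)).toNat = pre.drop (c + 1) := by
            rw [e1, e2, hpredef, List.drop_take]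
          have hscan2 : checkScan (s :: rest) n k f (s :: rest).length ((c : Int) + 1) 0
              = scanSeg k f (pre.drop (c + 1)) ((c : Int) + 1) 0 := by
            rw [checkScan_eq _ n k f hnl _ _ 0 (by omega) (by omega) (by simp; omega), hseg2]
          rw [hscan2]
          have hcnt2 := scanSeg_snd_lt k f (pre.drop (c + 1)) ((c : Int) + 1) 0 (by omega)
          rw [kthIndex_eq pre.reverse f k hk1]
          by_cases hfew : ((List.count f pre : Nat) : Int) < k
          · -- fewer than k copies of f in pre at all: both "NO"
            have hnone : (occIdx f pre.reverse)[(k - 1).toNat]? = none := by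
              apply List.getElem?_eq_none
              rw [length_occIdx, List.count_reverse]
              omega
            rw [hnone]
            dsimp only
            have hle : List.count f (pre.drop (c + 1)) ≤ List.count f pre :=
              (List.drop_sublist _ _).count_le f
            rw [if_pos (by rw [hcnt2]; push_cast; omega)]
          · push_neg at hfew
            have hsomer : ∃ r, (occIdx f pre.reverse)[(k - 1).toNat]? = some r := by
              have hlt : (k - 1).toNat < (occIdx f pre.reverse).length := by
                rw [length_occIdx, List.count_reverse]
                omega
              exact ⟨_, List.getElem?_eq_getElem hlt⟩
            obtain ⟨r, hr⟩ := hsomer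
            rw [hr]
            dsimp only
            obtain ⟨hrlt, hatb, hafter⟩ := rev_kth f pre (k - 1).toNat r hr
            -- b = pre.length - 1 - r, the k-th occurrence of f from the right
            have hbeq : (pre.length : Int) - 1 - (r : Int)
                = ((pre.length - 1 - r : Nat) : Int) := by omega
            set b := pre.length - 1 - r with hb
            have hbL : b < pre.length := by omega
            have hb1 : b + 1 = pre.length - r := by omega
            have hdropb : pre.drop b = pre[b] :: pre.drop (b + 1) :=
              List.drop_eq_getElem_cons hbL
            have hgetb : pre[b] = f := by
              have := List.getElem?_eq_getElem hbL
              rw [hatb] at this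
              exact (Option.some.inj this).symm
            have hcountb : List.count f (pre.drop b) = (k - 1).toNat + 1 := by
              rw [hdropb, List.count_cons, hgetb, hb1, hafter]
              simp
            by_cases hlt : (c : Int) < (pre.length : Int) - 1 - (r : Int)
            · -- a < b: enough f's after position c; both "YES"
              rw [if_pos hlt]
              have hcb : c + 1 ≤ b := by omega
              have hge : List.count f (pre.drop b) ≤ List.count f (pre.drop (c + 1)) :=
                count_drop_anti f pre (c + 1) b hcb
              rw [if_neg (by rw [hcnt2]; push_cast; omega)]
            · -- a ≥ b: at most k-1 f's after position c; both "NO"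
              rw [if_neg hlt]
              have hcb : b + 1 ≤ c + 1 := by omega
              have hle : List.count f (pre.drop (c + 1)) ≤ List.count f (pre.drop (b + 1)) :=
                count_drop_anti f pre (b + 1) (c + 1) hcb
              rw [hb1, hafter] at hle
              rw [if_pos (by rw [hcnt2]; push_cast; omega)]
    · -- k = 1 with n beyond the list: both "YES"
      subst hkeq
      rw [checkScan_of_ge _ _ _ _ _ _ _ (by omega)]
      rw [if_neg (show ¬ (((1 : Int), (1 : Int)).2 < 1) from by
        change ¬ ((1 : Int) < 1); omega)]
      have hall : PySem.List.slice (s :: rest) none (some n) = s :: rest := by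
        conv_lhs => rw [show n = ((n.toNat : Nat) : Int) from by omega]
        rw [PySem.List.slice_to_natCast]
        exact List.take_of_length_le (by omega)
      simp only [hall]
      have hoccCons : occIdx s (s :: rest) = 0 :: (occIdx s rest).map (· + 1) := by
        simp [occIdx]
      rw [kthIndex_eq _ s 1 (by omega)]
      rw [show ((1 : Int) - 1).toNat = 0 from rfl, hoccCons, List.getElem?_cons_zero]
      dsimp only
      by_cases hsf : s = f
      · rw [if_pos hsf, if_pos hsf]
      · rw [if_neg hsf, if_neg hsf]
        obtain ⟨b, l, rfl⟩ : ∃ b l, rest = b :: l := by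
          cases rest with
          | nil =>
            exfalso
            simp at hf
            exact hsf hf
          | cons b l => exact ⟨b, l, rfl⟩
        have hfm : f ∈ b :: l := by
          rw [List.getLast?_cons_cons] at hf
          exact List.mem_of_getLast? hf
        have hres : (checkScan (s :: b :: l) n 1 f (s :: b :: l).length 1 0).2 = 1 :=
          checkScan_count _ n 1 f hgt _ 1 0 (by omega) (by omega)
            (by
              show (1 : Int) - 0 ≤ ((List.count f (b :: l) : Nat) : Int)
              have := List.count_pos_iff.mpr hfm
              omega)
            (by omega)
        rw [if_neg (show ¬ ((checkScan (s :: b :: l) n 1 f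
            (s :: b :: l).length 1 0).2 < 1) from by rw [hres]; omega)]
        -- B: the reverse of seq starts with f (the last element), so r = 0 and b = len - 1 > 0
        obtain ⟨tl', hrev⟩ : ∃ tl', (s :: b :: l).reverse = f :: tl' := by
          have hh : (s :: b :: l).reverse.head? = some f := by
            rw [List.head?_reverse]
            exact hf
          cases hx : (s :: b :: l).reverse with
          | nil => rw [hx] at hh; simp at hh
          | cons y ys =>
            rw [hx, List.head?_cons] at hh
            exact ⟨ys, by rw [show y = f from Option.some.inj hh]⟩
        rw [kthIndex_eq _ f 1 (by omega),
          show ((1 : Int) - 1).toNat = 0 from rfl, hrev]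
        rw [show occIdx f (f :: tl') = 0 :: (occIdx f tl').map (· + 1) from by simp [occIdx]]
        rw [List.getElem?_cons_zero]
        dsimp only
        rw [if_pos (by
          show ((0 : Nat) : Int) < ((s :: b :: l).length : Int) - 1 - ((0 : Nat) : Int)
          simp)]
    · -- repeated endpoint with at least k copies, n beyond the list: both "YES"
      have hres : (checkScan (s :: rest) n k s (s :: rest).length 1 1).2 = k :=
        checkScan_count _ n k s hgt _ 1 1 (by omega) (by omega)
          (by
            show k - 1 ≤ ((List.count s rest : Nat) : Int)
            have hc : List.count s (s :: rest) = List.count s rest + 1 := by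
              simp [List.count_cons]
            omega)
          (by omega)
      rw [if_neg (show ¬ ((checkScan (s :: rest) n k s
          (s :: rest).length 1 1).2 < k) from by rw [hres]; omega)]
      have hall : PySem.List.slice (s :: rest) none (some n) = s :: rest := by
        conv_lhs => rw [show n = ((n.toNat : Nat) : Int) from by omega]
        rw [PySem.List.slice_to_natCast]
        exact List.take_of_length_le (by omega)
      simp only [hall]
      have hsome : ∃ c, (occIdx s (s :: rest))[(k - 1).toNat]? = some c := by
        have hlt : (k - 1).toNat < (occIdx s (s :: rest)).length := by
          rw [length_occIdx]
          omega
        exact ⟨_, List.getElem?_eq_getElem hlt⟩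
      obtain ⟨c, hc⟩ := hsome
      rw [kthIndex_eq _ s k hk1, hc]
      dsimp only
      rw [if_pos hsf, if_pos hsf]

-- ===== VERDICT (by name: the statement is the Claim_ definition above) =====
theorem check_spec : Claim_equal_check := by
  intro n k seq _ hpre
  unfold Spec_check
  exact check_eq_alt n k seq hpre
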